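-- pv_equiv track=rewrite | github.com/o9nn/nanechopy | reservoirpy/pytorch/autognosis/a000081.py | _compute_a000081
-- ===== SOURCE A (Python) =====
-- A000081_SEQUENCE = [
--     0,      # a(0) = 0 (placeholder for 0-indexing)
--     1,      # a(1) = 1
--     1,      # a(2) = 1
--     2,      # a(3) = 2
--     4,      # a(4) = 4
--     9,      # a(5) = 9
--     20,     # a(6) = 20
--     48,     # a(7) = 48
--     115,    # a(8) = 115
--     286,    # a(9) = 286
--     719,    # a(10) = 719
--     1842,   # a(11) = 1842
--     4766,   # a(12) = 4766
--     12486,  # a(13) = 12486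
--     32973,  # a(14) = 32973
--     87811,  # a(15) = 87811
--     235381, # a(16) = 235381
--     634847, # a(17) = 634847
--     1721159,# a(18) = 1721159
--     4688676,# a(19) = 4688676
--     12826228,# a(20) = 12826228
-- ]
--
-- def _compute_a000081(n: int) -> int:
--     """Compute A000081(n) using the recurrence relation.
--
--     Uses the Euler transform recurrence:
--     a(n) = (1/n) * sum_{k=1}^{n-1} (sum_{d|k} d * a(d)) * a(n-k)
--     """
--     if n < len(A000081_SEQUENCE):
--         return A000081_SEQUENCE[n]
--
--     # Extend sequence
--     a = list(A000081_SEQUENCE)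
--     while len(a) <= n:
--         m = len(a)
--         # Compute sum over divisors
--         total = 0
--         for k in range(1, m):
--             divisor_sum = sum(d * a[d] for d in range(1, k + 1) if k % d == 0)
--             total += divisor_sum * a[m - k]
--         a.append(total // m)
--
--     return a[n]
-- ===== SOURCE B (Python) =====
-- A000081_SEQUENCE = [
--     0, 1, 1, 2, 4, 9, 20, 48, 115, 286, 719, 1842, 4766, 12486, 32973,
--     87811, 235381, 634847, 1721159, 4688676, 12826228,
-- ]
--
-- def _compute_a000081(n: int) -> int:
--     """Same sequence as A, but each divisor sum b[k] = sum_{d|k} d*a[d] is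
--     computed once and cached, so extending costs O(n^2) instead of O(n^3)."""
--     if n < len(A000081_SEQUENCE):
--         return A000081_SEQUENCE[n]
--     a = list(A000081_SEQUENCE)
--     b = [0] * len(a)
--     for k in range(1, len(a)):
--         b[k] = sum(d * a[d] for d in range(1, k + 1) if k % d == 0)
--     for m in range(len(a), n + 1):
--         total = 0
--         for k in range(1, m):
--             total += b[k] * a[m - k]
--         a.append(total // m)
--         b.append(sum(d * a[d] for d in range(1, m + 1) if m % d == 0))
--     return a[n]
-- ===== Notes on version B (the rewrite author's own statement) =====
-- stated objective: faster
-- what changed: B precomputes and caches the divisor sums b[k] = sum_{d|k} d*a[d] (each computed exactly once, in a separate list grown alongside a) so each extension step is a single O(m) convolution, instead of A's recomputation of every divisor sum inside every outer step.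
import Mathlib
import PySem

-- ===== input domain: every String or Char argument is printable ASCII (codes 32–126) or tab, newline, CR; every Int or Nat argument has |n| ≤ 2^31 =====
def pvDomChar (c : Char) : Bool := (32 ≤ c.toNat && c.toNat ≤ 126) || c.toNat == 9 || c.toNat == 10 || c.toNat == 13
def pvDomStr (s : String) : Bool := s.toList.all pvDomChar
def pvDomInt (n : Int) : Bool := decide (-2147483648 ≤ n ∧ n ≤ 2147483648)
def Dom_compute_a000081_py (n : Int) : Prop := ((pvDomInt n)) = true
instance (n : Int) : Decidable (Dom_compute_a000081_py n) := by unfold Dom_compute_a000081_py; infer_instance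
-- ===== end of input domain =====

-- B caches each divisor sum b[k] = sum_{d|k} d*a[d] once instead of recomputing
-- it inside every outer step, so extending the table is one convolution per term.

-- ===== PORT A =====
-- module constant A000081_SEQUENCE

def pvSeqA : List Int :=
  [0, 1, 1, 2, 4, 9, 20, 48, 115, 286, 719, 1842, 4766, 12486, 32973,
   87811, 235381, 634847, 1721159, 4688676, 12826228]

-- divisor_sum = sum(d * a[d] for d in range(1, k + 1) if k % d == 0)
def pvDivSumA (a : List Int) (k : Int) : Int :=
  (PySem.List.pyRange 1 (k + 1) 1).foldl
    (fun s d => if PySem.Int.mod k d = 0 then s + d * PySem.List.pyGetD a d 0 else s) 0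

-- one iteration of A's while-loop body: append total // m
def pvStepA (a : List Int) : List Int :=
  let m : Int := (a.length : Int)
  let total := (PySem.List.pyRange 1 m 1).foldl
    (fun t k => t + pvDivSumA a k * PySem.List.pyGetD a (m - k) 0) 0
  a ++ [PySem.Int.floordiv total m]

-- 'while len(a) <= n': fuel-bounded recursion; fuel n.toNat + 1 suffices since each step grows a
def pvWhileA (n : Int) : Nat → List Int → List Int
  | 0, a => a
  | fuel + 1, a => if (a.length : Int) ≤ n then pvWhileA n fuel (pvStepA a) else a

def compute_a000081_py (n : Int) : Int :=
  if n < (pvSeqA.length : Int) then PySem.List.pyGetD pvSeqA n 0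
  else PySem.List.pyGetD (pvWhileA n (n.toNat + 1) pvSeqA) n 0

-- ===== PORT B =====
-- Source B's own copy of A000081_SEQUENCE
def pvSeqB : List Int :=
  [0, 1, 1, 2, 4, 9, 20, 48, 115, 286, 719, 1842, 4766, 12486, 32973,
   87811, 235381, 634847, 1721159, 4688676, 12826228]

-- sum(d * a[d] for d in range(1, m + 1) if m % d == 0)
def pvDivSumB (a : List Int) (m : Int) : Int :=
  (PySem.List.pyRange 1 (m + 1) 1).foldl
    (fun s d => if PySem.Int.mod m d = 0 then s + d * PySem.List.pyGetD a d 0 else s) 0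

-- 'for k in range(1, len(a)): b[k] = ...' over b = [0] * len(a)
def pvInitB (a : List Int) : List Int :=
  (PySem.List.pyRange 1 (a.length : Int) 1).foldl
    (fun b k => PySem.List.pySetD b k (pvDivSumB a k)) (List.replicate a.length 0)

-- body of 'for m in range(len(a), n + 1)': convolve with the cached b, then extend a and b
def pvStepB (st : List Int × List Int) (m : Int) : List Int × List Int :=
  let total := (PySem.List.pyRange 1 m 1).foldl
    (fun t k => t + PySem.List.pyGetD st.2 k 0 * PySem.List.pyGetD st.1 (m - k) 0) 0
  let a' := st.1 ++ [PySem.Int.floordiv total m]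
  (a', st.2 ++ [pvDivSumB a' m])

def compute_a000081_py_alt (n : Int) : Int :=
  if n < (pvSeqB.length : Int) then PySem.List.pyGetD pvSeqB n 0
  else
    let a := pvSeqB
    let b := pvInitB a
    let fin := (PySem.List.pyRange (a.length : Int) (n + 1) 1).foldl pvStepB (a, b)
    PySem.List.pyGetD fin.1 n 0


-- ===== PRECONDITION & SPEC =====
-- Pre_ excludes only n <= -22, where A raises IndexError (negative index past the
-- 21-entry table); B raises there too.
def Pre_compute_a000081_py (n : Int) : Prop := -21 <= n
instance (n : Int) : Decidable (Pre_compute_a000081_py n) := by unfold Pre_compute_a000081_py; infer_instance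
def pvWitness_compute_a000081_py : Int := 5

def Spec_compute_a000081_py (n : Int) (out : Int) : Prop := out = compute_a000081_py_alt n
instance (n : Int) (out : Int) : Decidable (Spec_compute_a000081_py n out) := by unfold Spec_compute_a000081_py; infer_instance

-- ===== CLAIM (what is proved, stated in full; the proofs are below) =====
def Claim_equal_compute_a000081_py : Prop := ∀ (n : Int), Dom_compute_a000081_py n → Pre_compute_a000081_py n → Spec_compute_a000081_py n (compute_a000081_py n)

-- ===== LEMMAS AND PROOFS =====


-- divisor sums only read a[1..k], so they are stable under appends to a
theorem pvDivSumA_append (a t : List Int) (k : Int) (hk : k < (a.length : Int)) :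
    pvDivSumA (a ++ t) k = pvDivSumA a k := by
  unfold pvDivSumA
  refine PySem.List.foldl_congr_mem _ _ _ _ (fun s d hd => ?_)
  rw [PySem.List.mem_pyRange_one] at hd
  rw [PySem.List.pyGetD_eq_getElem (a ++ t) 0 (by omega)
        (by rw [List.length_append]; push_cast; omega),
      PySem.List.pyGetD_eq_getElem a 0 (by omega) (by omega),
      List.getElem_append_left (by omega)]

-- the invariant B's loop maintains: b caches the divisor sums of the current a
def pvInv (a b : List Int) : Prop :=
  b.length = a.length ∧
  ∀ k : Nat, 1 ≤ k → k < a.length → b.getD k 0 = pvDivSumA a (k : Int)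

theorem pvInitB_aux (a : List Int) (j : Nat) (hj : j ≤ a.length) :
    ((PySem.List.pyRange 1 (j : Int) 1).foldl
      (fun b k => PySem.List.pySetD b k (pvDivSumB a k)) (List.replicate a.length 0)).length
        = a.length ∧
    ∀ k : Nat, 1 ≤ k → k < a.length →
      ((PySem.List.pyRange 1 (j : Int) 1).foldl
        (fun b k => PySem.List.pySetD b k (pvDivSumB a k)) (List.replicate a.length 0)).getD k 0
      = if k < j then pvDivSumA a (k : Int) else 0 := by
  induction j with
  | zero =>
    rw [PySem.List.pyRange_one_eq_nil (by omega)]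
    constructor
    · simp
    · intro k h1 h2
      rw [if_neg (by omega)]
      simp [List.getD_eq_getElem?_getD, h2]
  | succ j ih =>
    have ih' := ih (by omega)
    by_cases hj0 : j = 0
    · subst hj0
      rw [show ((1:Nat):Int) = 1 by norm_num, PySem.List.pyRange_one_eq_nil (by omega)]
      constructor
      · simp
      · intro k h1 h2
        rw [if_neg (by omega)]
        simp [List.getD_eq_getElem?_getD, h2]
    · rw [show ((j+1:Nat):Int) = (j:Int) + 1 by push_cast; ring,
          PySem.List.pyRange_one_succ_right (by omega), List.foldl_append]
      set B := (PySem.List.pyRange 1 (j : Int) 1).foldl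
        (fun b k => PySem.List.pySetD b k (pvDivSumB a k)) (List.replicate a.length 0) with hB
      simp only [List.foldl_cons, List.foldl_nil]
      have hlen : B.length = a.length := ih'.1
      constructor
      · rw [PySem.List.length_pySetD, hlen]
      · intro k h1 h2
        have hset : PySem.List.pySetD B (j : Int) (pvDivSumB a (j:Int)) = B.set j (pvDivSumB a (j:Int)) :=
          PySem.List.pySetD_natCast B j _
        rw [hset]
        rcases eq_or_ne k j with rfl | hne
        · rw [List.getD_eq_getElem?_getD, List.getElem?_set_self (by omega)]
          simp only [Option.getD_some]
          have : pvDivSumB a (k:Int) = pvDivSumA a (k:Int) := rfl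
          rw [if_pos (by omega)]
          exact this
        · rw [List.getD_eq_getElem?_getD, List.getElem?_set_ne (by omega)]
          rw [← List.getD_eq_getElem?_getD, ih'.2 k h1 h2]
          by_cases hk : k < j
          · rw [if_pos hk, if_pos (by omega)]
          · rw [if_neg hk, if_neg (by omega)]

theorem pvInitB_inv (a : List Int) : pvInv a (pvInitB a) := by
  have h := pvInitB_aux a a.length le_rfl
  unfold pvInv pvInitB
  refine ⟨h.1, fun k h1 h2 => ?_⟩
  rw [h.2 k h1 h2, if_pos h2]

theorem pvStepA_eq (a : List Int) :
    pvStepA a = a ++ [PySem.Int.floordiv ((PySem.List.pyRange 1 (a.length:Int) 1).foldl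
      (fun t k => t + pvDivSumA a k * PySem.List.pyGetD a ((a.length:Int) - k) 0) 0) (a.length:Int)] := rfl

theorem pvStepB_eq (a b : List Int) (h : pvInv a b) :
    pvStepB (a, b) (a.length : Int) =
      (pvStepA a, b ++ [pvDivSumA (pvStepA a) (a.length : Int)]) := by
  obtain ⟨hlen, hent⟩ := h
  have htot : (PySem.List.pyRange 1 (a.length:Int) 1).foldl
      (fun t k => t + PySem.List.pyGetD b k 0 * PySem.List.pyGetD a ((a.length:Int) - k) 0) 0
    = (PySem.List.pyRange 1 (a.length:Int) 1).foldl
      (fun t k => t + pvDivSumA a k * PySem.List.pyGetD a ((a.length:Int) - k) 0) 0 := by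
    refine PySem.List.foldl_congr_mem _ _ _ _ (fun t k hk => ?_)
    rw [PySem.List.mem_pyRange_one] at hk
    have hk' : k = ((k.toNat : Nat) : Int) := by omega
    rw [hk', PySem.List.pyGetD_natCast, hent k.toNat (by omega) (by omega)]
  have hrfl : pvStepB (a, b) (a.length : Int) =
      (a ++ [PySem.Int.floordiv ((PySem.List.pyRange 1 (a.length:Int) 1).foldl
        (fun t k => t + PySem.List.pyGetD b k 0 * PySem.List.pyGetD a ((a.length:Int) - k) 0) 0) (a.length:Int)],
       b ++ [pvDivSumB (a ++ [PySem.Int.floordiv ((PySem.List.pyRange 1 (a.length:Int) 1).foldl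
        (fun t k => t + PySem.List.pyGetD b k 0 * PySem.List.pyGetD a ((a.length:Int) - k) 0) 0) (a.length:Int)])
        (a.length:Int)]) := rfl
  rw [hrfl, htot]
  rfl

theorem pvStepB_inv (a b : List Int) (h : pvInv a b) :
    pvInv (pvStepA a) (b ++ [pvDivSumA (pvStepA a) (a.length : Int)]) := by
  obtain ⟨hlen, hent⟩ := h
  set v := pvDivSumA (pvStepA a) (a.length : Int) with hv
  constructor
  · rw [pvStepA_eq]
    simp [hlen]
  · intro k h1 h2
    rw [pvStepA_eq] at h2
    simp only [List.length_append, List.length_cons, List.length_nil] at h2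
    rcases lt_or_ge k a.length with hk | hk
    · rw [List.getD_append _ _ _ _ (by omega), hent k h1 hk, pvStepA_eq,
          pvDivSumA_append a _ (k:Int) (by omega)]
    · have hk' : k = a.length := by omega
      subst hk'
      rw [show a.length = b.length from hlen.symm, List.getD_eq_getElem?_getD,
          List.getElem?_concat_length, Option.getD_some, hv, hlen]

theorem pvLoop_eq (cnt : Nat) : ∀ (a b : List Int) (n : Int) (fuel : Nat),
    pvInv a b → (a.length : Int) + cnt = n + 1 → 1 ≤ a.length → cnt ≤ fuel →
    pvWhileA n fuel a = ((PySem.List.pyRange (a.length : Int) (n + 1) 1).foldl pvStepB (a, b)).1 := by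
  induction cnt with
  | zero =>
    intro a b n fuel hinv hlen h1 hfuel
    rw [PySem.List.pyRange_one_eq_nil (by omega)]
    simp only [List.foldl_nil]
    cases fuel with
    | zero => rfl
    | succ f =>
      unfold pvWhileA
      rw [if_neg (by omega)]
  | succ cnt ih =>
    intro a b n fuel hinv hlen h1 hfuel
    cases fuel with
    | zero => omega
    | succ f =>
      unfold pvWhileA
      rw [if_pos (by push_cast at hlen ⊢; omega)]
      rw [PySem.List.pyRange_one_cons (by omega), List.foldl_cons]
      rw [pvStepB_eq a b hinv]
      have hlen' : ((pvStepA a).length : Int) = (a.length : Int) + 1 := by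
        rw [pvStepA_eq]; simp
      rw [show (a.length : Int) + 1 = ((pvStepA a).length : Int) from hlen'.symm]
      exact ih (pvStepA a) _ n f (pvStepB_inv a b hinv) (by omega)
        (by omega) (by omega)


-- ===== VERDICT (by name: the statement is the Claim_ definition above) =====
theorem compute_a000081_py_spec : Claim_equal_compute_a000081_py := by
  intro n _ hpre
  unfold Spec_compute_a000081_py compute_a000081_py compute_a000081_py_alt
  have hBA : pvSeqB = pvSeqA := rfl
  rw [hBA]
  by_cases h : n < (pvSeqA.length : Int)
  · rw [if_pos h, if_pos h]
  · rw [if_neg h, if_neg h]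
    have h21 : (pvSeqA.length : Int) = 21 := by norm_num [pvSeqA]
    rw [h21] at h
    have hloop := pvLoop_eq (n + 1 - 21).toNat pvSeqA (pvInitB pvSeqA) n (n.toNat + 1)
      (pvInitB_inv _) (by rw [h21]; omega) (by norm_num [pvSeqA]) (by omega)
    simp only []
    rw [hloop]
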